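-- pv_equiv track=rewrite | github.com/marpa96/FinProg | scripts/import_rocketmoney_curls.py | normalize_windows_curl
-- ===== SOURCE A (Python) =====
-- def normalize_windows_curl(text: str) -> str:
--     text = text.replace("^\r\n", " ").replace("^\n", " ")
--     replacements = {
--         '^"': '"',
--         "^&": "&",
--         "^%": "%",
--         "^?": "?",
--     }
--     for old, new in replacements.items():
--         text = text.replace(old, new)
--     return text
-- ===== SOURCE B (Python) =====
-- def normalize_windows_curl(text: str) -> str:
--     # single left-to-right scan instead of six replace passes
--     out = []
--     i, n = 0, len(text)
--     while i < n:
--         if text[i] == "^":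
--             if text[i + 1 : i + 3] == "\r\n":
--                 out.append(" ")
--                 i += 3
--                 continue
--             c = text[i + 1 : i + 2]
--             if c == "\n":
--                 out.append(" ")
--                 i += 2
--                 continue
--             if c in ('"', "&", "%", "?"):
--                 out.append(c)
--                 i += 2
--                 continue
--         out.append(text[i])
--         i += 1
--     return "".join(out)
-- ===== Notes on version B (the rewrite author's own statement) =====
-- stated objective: alternative
-- what changed: Replaced A's six sequential str.replace passes over the whole string with a single left-to-right scan that, at each caret, tries the patterns in priority order and emits the substitution directly.
import Mathlib
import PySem

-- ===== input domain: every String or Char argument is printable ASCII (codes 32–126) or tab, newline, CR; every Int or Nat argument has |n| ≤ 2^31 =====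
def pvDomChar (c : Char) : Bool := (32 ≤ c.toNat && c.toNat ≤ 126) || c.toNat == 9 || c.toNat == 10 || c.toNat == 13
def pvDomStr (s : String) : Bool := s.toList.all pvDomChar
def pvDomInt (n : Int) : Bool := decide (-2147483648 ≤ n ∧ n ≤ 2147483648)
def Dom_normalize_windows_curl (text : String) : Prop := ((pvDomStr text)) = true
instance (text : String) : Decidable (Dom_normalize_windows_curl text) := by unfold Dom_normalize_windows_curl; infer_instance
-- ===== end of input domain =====

-- B replaces A's six sequential str.replace passes by one left-to-right scan; alternative decomposition, same result.

-- ===== PORT A =====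
def normalize_windows_curl (text : String) : String :=
  let text := PySem.Str.replace (PySem.Str.replace text "^\r\n" " ") "^\n" " "
  let replacements : PySem.Dict String String :=
    PySem.Dict.ofList [("^\"", "\""), ("^&", "&"), ("^%", "%"), ("^?", "?")]
  replacements.items.foldl (fun t p => PySem.Str.replace t p.1 p.2) text

-- ===== PORT B =====
-- one pass over the characters: at '^' try the patterns in priority order, emit the substitution
-- and skip the matched pattern; otherwise emit the character (mirrors Source B's while loop)
def scanChars : List Char → List Char
  | '^' :: '\r' :: '\n' :: t => ' ' :: scanChars t
  | '^' :: '\n' :: t => ' ' :: scanChars t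
  | '^' :: '"' :: t => '"' :: scanChars t
  | '^' :: '&' :: t => '&' :: scanChars t
  | '^' :: '%' :: t => '%' :: scanChars t
  | '^' :: '?' :: t => '?' :: scanChars t
  | c :: t => c :: scanChars t
  | [] => []

def normalize_windows_curl_alt (text : String) : String :=
  String.ofList (scanChars text.toList)

-- ===== PRECONDITION & SPEC =====
def Spec_normalize_windows_curl (text : String) (out : String) : Prop := out = normalize_windows_curl_alt text
instance (text : String) (out : String) : Decidable (Spec_normalize_windows_curl text out) := by unfold Spec_normalize_windows_curl; infer_instance

-- ===== CLAIM (what is proved, stated in full; the proofs are below) =====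
def Claim_equal_normalize_windows_curl : Prop := ∀ (text : String), Dom_normalize_windows_curl text → Spec_normalize_windows_curl text (normalize_windows_curl text)

-- ===== LEMMAS AND PROOFS =====

-- structural (fuel-indexed) version of PySem.Chars.replace.go without the accumulator
def repF (old new : List Char) : Nat → List Char → List Char
  | 0, l => l
  | _+1, [] => []
  | fuel+1, c::t =>
    if old.isPrefixOf (c::t) then new ++ repF old new fuel (List.drop old.length (c::t))
    else c :: repF old new fuel t

theorem go_eq_repF (old new : List Char) :
    ∀ fuel l acc, PySem.Chars.replace.go old new fuel l acc = acc.reverse ++ repF old new fuel l := by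
  intro fuel
  induction fuel with
  | zero =>
    intro l acc
    rw [PySem.Chars.replace.go.eq_def]
    simp [repF]
  | succ f ih =>
    intro l acc
    cases l with
    | nil =>
      rw [PySem.Chars.replace.go.eq_def]
      simp [repF]
    | cons c t =>
      rw [PySem.Chars.replace.go.eq_def]
      simp only [repF]
      split_ifs with h
      · rw [ih]; simp
      · rw [ih]; simp

theorem replace_eq_repF (old new l : List Char) (hold : old ≠ []) :
    PySem.Chars.replace l old new = repF old new l.length l := by
  unfold PySem.Chars.replace
  rw [if_neg (by simp [hold])]
  rw [go_eq_repF]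
  simp

theorem repF_irrel (old new : List Char) (hold : 1 ≤ old.length) :
    ∀ f1 f2 l, l.length ≤ f1 → l.length ≤ f2 → repF old new f1 l = repF old new f2 l := by
  intro f1
  induction f1 with
  | zero =>
    intro f2 l h1 h2
    have hl : l = [] := by cases l with | nil => rfl | cons c t => simp at h1
    subst hl
    cases f2 <;> simp [repF]
  | succ f ih =>
    intro f2 l h1 h2
    cases l with
    | nil => cases f2 <;> simp [repF]
    | cons c t =>
      cases f2 with
      | zero => simp at h2
      | succ f2' =>
        simp only [repF]
        split_ifs with h
        · have hA : (List.drop old.length (c::t)).length ≤ f := by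
            simp only [List.length_drop, List.length_cons] at *
            omega
          have hB : (List.drop old.length (c::t)).length ≤ f2' := by
            simp only [List.length_drop, List.length_cons] at *
            omega
          rw [ih f2' (List.drop old.length (c::t)) hA hB]
        · rw [ih f2' t (by simp at h1; omega) (by simp at h2; omega)]

theorem replace_cons (old new : List Char) (hold : old ≠ []) (c : Char) (t : List Char) :
    PySem.Chars.replace (c::t) old new =
      if old.isPrefixOf (c::t) then
        new ++ PySem.Chars.replace (List.drop old.length (c::t)) old new
      else c :: PySem.Chars.replace t old new := by
  have hl1 : 1 ≤ old.length := by
    cases old with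
    | nil => exact absurd rfl hold
    | cons a b => simp
  rw [replace_eq_repF _ _ _ hold]
  simp only [List.length_cons, repF]
  split_ifs with h
  · rw [replace_eq_repF _ _ _ hold]
    rw [repF_irrel old new hl1 t.length (List.drop old.length (c::t)).length _
      (by simp only [List.length_drop, List.length_cons]; omega) le_rfl]
  · rw [replace_eq_repF _ _ _ hold]

-- A's six passes, as one function on the character list
def chainF (cs : List Char) : List Char :=
  PySem.Chars.replace (PySem.Chars.replace (PySem.Chars.replace (PySem.Chars.replace
    (PySem.Chars.replace (PySem.Chars.replace cs ['^', '\r', '\n'] [' '])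
      ['^', '\n'] [' ']) ['^', '"'] ['"']) ['^', '&'] ['&']) ['^', '%'] ['%']) ['^', '?'] ['?']

-- a character other than '^' passes unchanged through a '^'-headed replace
theorem push_ne_hat (c : Char) (h : c ≠ '^') (t os new : List Char) :
    PySem.Chars.replace (c::t) ('^'::os) new = c :: PySem.Chars.replace t ('^'::os) new := by
  rw [replace_cons _ _ (by simp) c t, if_neg]
  intro hpre
  simp only [List.isPrefixOf, Bool.and_eq_true, beq_iff_eq] at hpre
  exact h hpre.1.symm

-- '^' passes unchanged through a two-char replace when the next char does not match
theorem push_hat2 (c2 r : Char) (X : List Char) (h : X.head? ≠ some c2) :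
    PySem.Chars.replace ('^'::X) ['^', c2] [r] = '^' :: PySem.Chars.replace X ['^', c2] [r] := by
  rw [replace_cons _ _ (by simp), if_neg]
  cases X with
  | nil => simp [List.isPrefixOf]
  | cons e u =>
    simp only [List.head?_cons, ne_eq, Option.some.injEq] at h
    intro hpre
    simp only [List.isPrefixOf, Bool.and_eq_true, beq_iff_eq] at hpre
    exact h hpre.2.1.symm

-- '^' passes unchanged through the '^\r\n' replace when '\r\n' does not follow
theorem push_hat3 (X : List Char) (h : ['\r', '\n'].isPrefixOf X = false) :
    PySem.Chars.replace ('^'::X) ['^', '\r', '\n'] [' ']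
      = '^' :: PySem.Chars.replace X ['^', '\r', '\n'] [' '] := by
  rw [replace_cons _ _ (by simp), if_neg]
  intro hpre
  simp only [List.isPrefixOf, beq_self_eq_true, Bool.true_and] at hpre
  rw [h] at hpre
  exact Bool.false_ne_true hpre

-- a single-char replace keeps the head or turns it into the replacement char
theorem replace_head? (os : List Char) (r : Char) (X : List Char) (e : Char)
    (hX : X.head? = some e) :
    (PySem.Chars.replace X ('^'::os) [r]).head? = some e ∨
    (PySem.Chars.replace X ('^'::os) [r]).head? = some r := by
  cases X with
  | nil => simp at hX
  | cons c t =>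
    simp only [List.head?_cons, Option.some.injEq] at hX
    rw [replace_cons _ _ (by simp)]
    split_ifs with h
    · right; simp
    · left; simp [hX]

-- the fall-through arm of B's match
theorem scan_default (c : Char) (t : List Char)
    (h1 : ∀ t1, c = '^' → t = '\r'::'\n'::t1 → False)
    (h2 : ∀ t1, c = '^' → t = '\n'::t1 → False)
    (h3 : ∀ t1, c = '^' → t = '"'::t1 → False)
    (h4 : ∀ t1, c = '^' → t = '&'::t1 → False)
    (h5 : ∀ t1, c = '^' → t = '%'::t1 → False)
    (h6 : ∀ t1, c = '^' → t = '?'::t1 → False) :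
    scanChars (c::t) = c :: scanChars t := by
  rw [scanChars.eq_def]
  split <;> simp_all

set_option maxHeartbeats 1000000 in
theorem hat_default_chain (d : Char) (t' : List Char)
    (hrn : ['\r', '\n'].isPrefixOf (d::t') = false)
    (hd2 : d ≠ '\n') (hd3 : d ≠ '"') (hd4 : d ≠ '&') (hd5 : d ≠ '%') (hd6 : d ≠ '?') :
    chainF ('^'::d::t') = '^' :: chainF (d::t') := by
  unfold chainF
  set X1 := PySem.Chars.replace (d::t') ['^','\r','\n'] [' '] with hX1
  obtain ⟨e1, he1, hm1⟩ : ∃ e1, X1.head? = some e1 ∧ (e1 = d ∨ e1 = ' ') := by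
    rcases replace_head? ['\r','\n'] ' ' (d::t') d (by simp) with h | h
    · exact ⟨d, h, Or.inl rfl⟩
    · exact ⟨' ', h, Or.inr rfl⟩
  have hne1 : X1.head? ≠ some '\n' := by
    rw [he1]; rcases hm1 with h | h <;> subst h <;> simp [hd2]
  rw [push_hat3 (d::t') hrn, push_hat2 '\n' ' ' X1 hne1]
  set X2 := PySem.Chars.replace X1 ['^','\n'] [' '] with hX2
  obtain ⟨e2, he2, hm2⟩ : ∃ e2, X2.head? = some e2 ∧ (e2 = d ∨ e2 = ' ') := by
    rcases replace_head? ['\n'] ' ' X1 e1 he1 with h | h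
    · exact ⟨e1, h, hm1⟩
    · exact ⟨' ', h, Or.inr rfl⟩
  have hne2 : X2.head? ≠ some '"' := by
    rw [he2]; rcases hm2 with h | h <;> subst h <;> simp [hd3]
  rw [push_hat2 '"' '"' X2 hne2]
  set X3 := PySem.Chars.replace X2 ['^','"'] ['"'] with hX3
  obtain ⟨e3, he3, hm3⟩ : ∃ e3, X3.head? = some e3 ∧ (e3 = d ∨ e3 = ' ' ∨ e3 = '"') := by
    rcases replace_head? ['"'] '"' X2 e2 he2 with h | h
    · exact ⟨e2, h, hm2.imp id Or.inl⟩
    · exact ⟨'"', h, Or.inr (Or.inr rfl)⟩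
  have hne3 : X3.head? ≠ some '&' := by
    rw [he3]; rcases hm3 with h | h | h <;> subst h <;> simp [hd4]
  rw [push_hat2 '&' '&' X3 hne3]
  set X4 := PySem.Chars.replace X3 ['^','&'] ['&'] with hX4
  obtain ⟨e4, he4, hm4⟩ : ∃ e4, X4.head? = some e4 ∧
      (e4 = d ∨ e4 = ' ' ∨ e4 = '"' ∨ e4 = '&') := by
    rcases replace_head? ['&'] '&' X3 e3 he3 with h | h
    · exact ⟨e3, h, hm3.imp id (fun hh => hh.imp id Or.inl)⟩
    · exact ⟨'&', h, Or.inr (Or.inr (Or.inr rfl))⟩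
  have hne4 : X4.head? ≠ some '%' := by
    rw [he4]; rcases hm4 with h | h | h | h <;> subst h <;> simp [hd5]
  rw [push_hat2 '%' '%' X4 hne4]
  set X5 := PySem.Chars.replace X4 ['^','%'] ['%'] with hX5
  obtain ⟨e5, he5, hm5⟩ : ∃ e5, X5.head? = some e5 ∧
      (e5 = d ∨ e5 = ' ' ∨ e5 = '"' ∨ e5 = '&' ∨ e5 = '%') := by
    rcases replace_head? ['%'] '%' X4 e4 he4 with h | h
    · exact ⟨e4, h, hm4.imp id (fun hh => hh.imp id (fun hh2 => hh2.imp id Or.inl))⟩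
    · exact ⟨'%', h, Or.inr (Or.inr (Or.inr (Or.inr rfl)))⟩
  have hne5 : X5.head? ≠ some '?' := by
    rw [he5]; rcases hm5 with h | h | h | h | h <;> subst h <;> simp [hd6]
  rw [push_hat2 '?' '?' X5 hne5]

theorem chainF_cons_ne (c : Char) (hc : c ≠ '^') (t : List Char) :
    chainF (c::t) = c :: chainF t := by
  unfold chainF
  rw [push_ne_hat c hc, push_ne_hat c hc, push_ne_hat c hc, push_ne_hat c hc,
      push_ne_hat c hc, push_ne_hat c hc]

set_option maxHeartbeats 1000000 in
theorem chainF_eq_scan : ∀ cs, chainF cs = scanChars cs := by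
  intro cs
  induction cs using scanChars.induct with
  | case1 t ih =>
    unfold chainF at ih ⊢
    rw [replace_cons ['^','\r','\n'] [' '] (by simp) '^' ('\r'::'\n'::t),
        if_pos (by simp [List.isPrefixOf])]
    simp only [List.length_cons, List.length_nil, List.drop_succ_cons, List.drop_zero,
      List.singleton_append]
    rw [push_ne_hat ' ' (by decide), push_ne_hat ' ' (by decide), push_ne_hat ' ' (by decide),
        push_ne_hat ' ' (by decide), push_ne_hat ' ' (by decide)]
    rw [ih]
    rfl
  | case2 t ih =>
    unfold chainF at ih ⊢
    rw [push_hat3 ('\n'::t) (by simp [List.isPrefixOf]), push_ne_hat '\n' (by decide)]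
    rw [replace_cons ['^','\n'] [' '] (by simp) '^'
        ('\n' :: PySem.Chars.replace t ['^','\r','\n'] [' ']),
        if_pos (by simp [List.isPrefixOf])]
    simp only [List.length_cons, List.length_nil, List.drop_succ_cons, List.drop_zero,
      List.singleton_append]
    rw [push_ne_hat ' ' (by decide), push_ne_hat ' ' (by decide), push_ne_hat ' ' (by decide),
        push_ne_hat ' ' (by decide)]
    rw [ih]
    rfl
  | case3 t ih =>
    unfold chainF at ih ⊢
    rw [push_hat3 ('"'::t) (by simp [List.isPrefixOf]), push_ne_hat '"' (by decide)]
    rw [push_hat2 '\n' ' ' ('"' :: PySem.Chars.replace t ['^','\r','\n'] [' ']) (by simp),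
        push_ne_hat '"' (by decide)]
    rw [replace_cons ['^','"'] ['"'] (by simp) '^'
        ('"' :: PySem.Chars.replace (PySem.Chars.replace t ['^','\r','\n'] [' ']) ['^','\n'] [' ']),
        if_pos (by simp [List.isPrefixOf])]
    simp only [List.length_cons, List.length_nil, List.drop_succ_cons, List.drop_zero,
      List.singleton_append]
    rw [push_ne_hat '"' (by decide), push_ne_hat '"' (by decide), push_ne_hat '"' (by decide)]
    rw [ih]
    rfl
  | case4 t ih =>
    unfold chainF at ih ⊢
    rw [push_hat3 ('&'::t) (by simp [List.isPrefixOf]), push_ne_hat '&' (by decide)]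
    rw [push_hat2 '\n' ' ' ('&' :: PySem.Chars.replace t ['^','\r','\n'] [' ']) (by simp),
        push_ne_hat '&' (by decide)]
    rw [push_hat2 '"' '"'
        ('&' :: PySem.Chars.replace (PySem.Chars.replace t ['^','\r','\n'] [' ']) ['^','\n'] [' '])
        (by simp), push_ne_hat '&' (by decide)]
    rw [replace_cons ['^','&'] ['&'] (by simp) '^'
        ('&' :: PySem.Chars.replace (PySem.Chars.replace (PySem.Chars.replace t
          ['^','\r','\n'] [' ']) ['^','\n'] [' ']) ['^','"'] ['"']),
        if_pos (by simp [List.isPrefixOf])]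
    simp only [List.length_cons, List.length_nil, List.drop_succ_cons, List.drop_zero,
      List.singleton_append]
    rw [push_ne_hat '&' (by decide), push_ne_hat '&' (by decide)]
    rw [ih]
    rfl
  | case5 t ih =>
    unfold chainF at ih ⊢
    rw [push_hat3 ('%'::t) (by simp [List.isPrefixOf]), push_ne_hat '%' (by decide)]
    rw [push_hat2 '\n' ' ' ('%' :: PySem.Chars.replace t ['^','\r','\n'] [' ']) (by simp),
        push_ne_hat '%' (by decide)]
    rw [push_hat2 '"' '"'
        ('%' :: PySem.Chars.replace (PySem.Chars.replace t ['^','\r','\n'] [' ']) ['^','\n'] [' '])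
        (by simp), push_ne_hat '%' (by decide)]
    rw [push_hat2 '&' '&'
        ('%' :: PySem.Chars.replace (PySem.Chars.replace (PySem.Chars.replace t
          ['^','\r','\n'] [' ']) ['^','\n'] [' ']) ['^','"'] ['"'])
        (by simp), push_ne_hat '%' (by decide)]
    rw [replace_cons ['^','%'] ['%'] (by simp) '^'
        ('%' :: PySem.Chars.replace (PySem.Chars.replace (PySem.Chars.replace
          (PySem.Chars.replace t ['^','\r','\n'] [' ']) ['^','\n'] [' ']) ['^','"'] ['"'])
          ['^','&'] ['&']),
        if_pos (by simp [List.isPrefixOf])]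
    simp only [List.length_cons, List.length_nil, List.drop_succ_cons, List.drop_zero,
      List.singleton_append]
    rw [push_ne_hat '%' (by decide)]
    rw [ih]
    rfl
  | case6 t ih =>
    unfold chainF at ih ⊢
    rw [push_hat3 ('?'::t) (by simp [List.isPrefixOf]), push_ne_hat '?' (by decide)]
    rw [push_hat2 '\n' ' ' ('?' :: PySem.Chars.replace t ['^','\r','\n'] [' ']) (by simp),
        push_ne_hat '?' (by decide)]
    rw [push_hat2 '"' '"'
        ('?' :: PySem.Chars.replace (PySem.Chars.replace t ['^','\r','\n'] [' ']) ['^','\n'] [' '])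
        (by simp), push_ne_hat '?' (by decide)]
    rw [push_hat2 '&' '&'
        ('?' :: PySem.Chars.replace (PySem.Chars.replace (PySem.Chars.replace t
          ['^','\r','\n'] [' ']) ['^','\n'] [' ']) ['^','"'] ['"'])
        (by simp), push_ne_hat '?' (by decide)]
    rw [push_hat2 '%' '%'
        ('?' :: PySem.Chars.replace (PySem.Chars.replace (PySem.Chars.replace
          (PySem.Chars.replace t ['^','\r','\n'] [' ']) ['^','\n'] [' ']) ['^','"'] ['"'])
          ['^','&'] ['&'])
        (by simp), push_ne_hat '?' (by decide)]
    rw [replace_cons ['^','?'] ['?'] (by simp) '^'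
        ('?' :: PySem.Chars.replace (PySem.Chars.replace (PySem.Chars.replace
          (PySem.Chars.replace (PySem.Chars.replace t ['^','\r','\n'] [' ']) ['^','\n'] [' '])
          ['^','"'] ['"']) ['^','&'] ['&']) ['^','%'] ['%']),
        if_pos (by simp [List.isPrefixOf])]
    simp only [List.length_cons, List.length_nil, List.drop_succ_cons, List.drop_zero,
      List.singleton_append]
    rw [ih]
    rfl
  | case7 c t h1 h2 h3 h4 h5 h6 ih =>
    by_cases hc : c = '^'
    · subst hc
      cases t with
      | nil => decide
      | cons d t' =>
        have hd2 : d ≠ '\n' := fun hh => h2 t' rfl (by rw [hh])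
        have hd3 : d ≠ '"' := fun hh => h3 t' rfl (by rw [hh])
        have hd4 : d ≠ '&' := fun hh => h4 t' rfl (by rw [hh])
        have hd5 : d ≠ '%' := fun hh => h5 t' rfl (by rw [hh])
        have hd6 : d ≠ '?' := fun hh => h6 t' rfl (by rw [hh])
        have hrn : ['\r', '\n'].isPrefixOf (d::t') = false := by
          by_cases hd : d = '\r'
          · subst hd
            cases t' with
            | nil => rfl
            | cons e u =>
              have he : e ≠ '\n' := fun hh => h1 u rfl (by rw [hh])
              simp [List.isPrefixOf, Ne.symm he]
          · simp [List.isPrefixOf, Ne.symm hd]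
        rw [hat_default_chain d t' hrn hd2 hd3 hd4 hd5 hd6, ih,
            scan_default '^' (d::t') h1 h2 h3 h4 h5 h6]
    · rw [chainF_cons_ne c hc t, ih, scan_default c t h1 h2 h3 h4 h5 h6]
  | case8 => decide

-- bridge the String ports to the list-level functions
theorem A_toList (text : String) :
    (normalize_windows_curl text).toList = chainF text.toList := by
  show (PySem.Str.replace (PySem.Str.replace (PySem.Str.replace (PySem.Str.replace
    (PySem.Str.replace (PySem.Str.replace text "^\r\n" " ") "^\n" " ")
    "^\"" "\"") "^&" "&") "^%" "%") "^?" "?").toList = _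
  simp only [PySem.Str.toList_replace]
  rfl

theorem B_toList (text : String) :
    (normalize_windows_curl_alt text).toList = scanChars text.toList := by
  simp [normalize_windows_curl_alt]

-- ===== VERDICT (by name: the statement is the Claim_ definition above) =====
theorem normalize_windows_curl_spec : Claim_equal_normalize_windows_curl := by
  intro text _
  unfold Spec_normalize_windows_curl
  apply String.toList_inj.mp
  rw [A_toList, B_toList, chainF_eq_scan]
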